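-- pv_equiv track=rewrite | github.com/kirillbarashkov/dwar-rater | backend/shared/services/exporter.py | _format_item_enchants
-- ===== SOURCE A (Python) =====
-- def _format_item_enchants(enchants):
--     if not enchants:
--         return {}
--     groups = {}
--     for e in enchants:
--         etype = e.get('type', '')
--         if etype:
--             groups.setdefault(etype, []).append(e.get('value', ''))
--     return groups
-- ===== SOURCE B (Python) =====
-- def _format_item_enchants(enchants):
--     # Two-pass decomposition: collect the distinct truthy types in first-occurrence
--     # order, then build each group's value list with one comprehension per type.
--     order = []
--     for e in enchants:
--         t = e.get('type', '')
--         if t and t not in order: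
--             order.append(t)
--     return {t: [e.get('value', '') for e in enchants if e.get('type', '') == t]
--             for t in order}
-- ===== Notes on version B (the rewrite author's own statement) =====
-- stated objective: alternative
-- what changed: Replaces the single-pass setdefault-and-append accumulation into one dict with a two-pass scheme: first collect the distinct truthy types in first-occurrence order, then a dict comprehension that filters the values for each type.
import Mathlib
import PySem

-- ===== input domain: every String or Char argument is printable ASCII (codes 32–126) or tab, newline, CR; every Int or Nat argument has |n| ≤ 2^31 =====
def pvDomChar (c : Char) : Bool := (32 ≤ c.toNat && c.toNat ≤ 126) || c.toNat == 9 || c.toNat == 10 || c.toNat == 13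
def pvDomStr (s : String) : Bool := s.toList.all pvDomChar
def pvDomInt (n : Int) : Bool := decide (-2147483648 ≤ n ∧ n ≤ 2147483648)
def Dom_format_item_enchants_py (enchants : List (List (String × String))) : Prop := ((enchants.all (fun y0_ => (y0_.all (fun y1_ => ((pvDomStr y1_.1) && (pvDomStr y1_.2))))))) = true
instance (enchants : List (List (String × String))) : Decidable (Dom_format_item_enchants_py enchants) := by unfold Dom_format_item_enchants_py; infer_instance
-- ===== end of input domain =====

-- B replaces A's single-pass setdefault/append dict accumulation by a two-pass
-- scheme (distinct truthy types in first-occurrence order, then one filter per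
-- type); objective: alternative decomposition, same result.


-- shared primitive: Python dict.get(k, dflt) on an assoc list (first match)
def pyLookup (e : List (String × String)) (k dflt : String) : String :=
  match e.find? (fun p => p.1 == k) with
  | some p => p.2
  | none => dflt

-- ===== PORT A =====
def format_item_enchants_py (enchants : List (List (String × String))) : List (String × List String) :=
  if enchants = [] then []
  else
    (enchants.foldl
      (fun groups e =>
        let etype := pyLookup e "type" ""
        if etype ≠ "" then
          -- groups.setdefault(etype, []).append(v) ≡ groups[etype] = groups.get(etype, []) + [v]
          groups.modify etype [] (fun l => l ++ [pyLookup e "value" ""])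
        else groups)
      PySem.Dict.empty).items

-- ===== PORT B =====
def format_item_enchants_py_alt (enchants : List (List (String × String))) : List (String × List String) :=
  let order := enchants.foldl
    (fun acc e =>
      let t := pyLookup e "type" ""
      if t ≠ "" ∧ t ∉ acc then acc ++ [t] else acc) []
  order.map (fun t =>
    (t, (enchants.filter (fun e => pyLookup e "type" "" = t)).map
          (fun e => pyLookup e "value" "")))

-- ===== PRECONDITION & SPEC =====
def Spec_format_item_enchants_py (enchants : List (List (String × String))) (out : List (String × List String)) : Prop := out = format_item_enchants_py_alt enchants
instance (enchants : List (List (String × String))) (out : List (String × List String)) : Decidable (Spec_format_item_enchants_py enchants out) := by unfold Spec_format_item_enchants_py; infer_instance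

-- ===== CLAIM (what is proved, stated in full; the proofs are below) =====
def Claim_equal_format_item_enchants_py : Prop := ∀ (enchants : List (List (String × String))), Dom_format_item_enchants_py enchants → Spec_format_item_enchants_py enchants (format_item_enchants_py enchants)

-- ===== LEMMAS AND PROOFS =====

def gT (e : List (String × String)) : String := pyLookup e "type" ""
def gV (e : List (String × String)) : String := pyLookup e "value" ""

def kstep (acc : List String) (e : List (String × String)) : List String :=
  if gT e ≠ "" ∧ gT e ∉ acc then acc ++ [gT e] else acc

def dstep (d : PySem.Dict String (List String)) (e : List (String × String)) :
    PySem.Dict String (List String) :=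
  if gT e ≠ "" then d.modify (gT e) [] (fun l => l ++ [gV e]) else d

def valsOf (p : List (List (String × String))) (t : String) : List String :=
  (p.filter (fun e => gT e = t)).map gV

theorem mem_foldl_kstep_of_mem {t : String} :
    ∀ (p : List (List (String × String))) (acc : List String), t ∈ acc → t ∈ p.foldl kstep acc := by
  intro p
  induction p with
  | nil => intro acc h; exact h
  | cons a p ih =>
    intro acc h
    apply ih
    unfold kstep
    split
    · exact List.mem_append_left _ h
    · exact h

theorem mem_foldl_kstep {e : List (String × String)} :
    ∀ (p : List (List (String × String))) (acc : List String),
      e ∈ p → gT e ≠ "" → gT e ∈ p.foldl kstep acc := by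
  intro p
  induction p with
  | nil => intro acc h; cases h
  | cons a p ih =>
    intro acc h hne
    rcases List.mem_cons.mp h with h | h
    · subst h
      rw [List.foldl_cons]
      apply mem_foldl_kstep_of_mem
      unfold kstep
      split
      · exact List.mem_append_right _ (List.mem_singleton.mpr rfl)
      · rename_i hc
        rcases not_and_or.mp hc with hc | hc
        · exact absurd hne hc
        · exact not_not.mp hc
    · exact ih _ h hne

theorem ne_empty_of_mem_foldl_kstep {t : String} :
    ∀ (p : List (List (String × String))) (acc : List String),
      t ∈ p.foldl kstep acc → t ∈ acc ∨ t ≠ "" := by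
  intro p
  induction p with
  | nil => intro acc h; exact Or.inl h
  | cons a p ih =>
    intro acc h
    rcases ih _ h with h' | h'
    · unfold kstep at h'
      split at h'
      · rcases List.mem_append.mp h' with h'' | h''
        · exact Or.inl h''
        · rename_i hc
          rw [List.mem_singleton.mp h'']
          exact Or.inr hc.1
      · exact Or.inl h'
    · exact Or.inr h'

theorem nodup_foldl_kstep :
    ∀ (p : List (List (String × String))) (acc : List String),
      acc.Nodup → (p.foldl kstep acc).Nodup := by
  intro p
  induction p with
  | nil => intro acc h; exact h
  | cons a p ih =>
    intro acc h
    apply ih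
    unfold kstep
    split
    · rename_i hc
      exact List.Nodup.append h (List.nodup_singleton _) (List.disjoint_singleton.mpr hc.2)
    · exact h

theorem modify_eq_insert (d : PySem.Dict String (List String)) (k : String)
    (f : List String → List String) :
    d.modify k [] f = d.insert k (f (d.getD k [])) := rfl

theorem vals_snoc (p : List (List (String × String))) (e : List (String × String)) (t : String) :
    valsOf (p ++ [e]) t = valsOf p t ++ (if gT e = t then [gV e] else []) := by
  unfold valsOf
  rw [List.filter_append, List.map_append]
  congr 1
  by_cases h : gT e = t <;> simp [h]

theorem keys_dstep (d : PySem.Dict String (List String)) (K : List String)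
    (e : List (String × String)) (hk : d.keys = K) :
    (dstep d e).keys = kstep K e := by
  unfold dstep kstep
  by_cases h0 : gT e = ""
  · rw [if_neg (by simp [h0]), if_neg (by simp [h0]), hk]
  · rw [if_pos h0, modify_eq_insert]
    by_cases hin : gT e ∈ K
    · have hcont : d.contains (gT e) = true := by
        rw [PySem.Dict.contains_iff_mem_keys, hk]; exact hin
      rw [PySem.Dict.keys_insert_of_contains _ _ hcont, hk, if_neg (by simp [hin])]
    · have hcont : d.contains (gT e) = false := by
        rw [Bool.eq_false_iff]
        intro hc
        exact hin (hk ▸ (PySem.Dict.contains_iff_mem_keys _ _).mp hc)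
      rw [PySem.Dict.keys_insert_of_not_contains _ _ hcont, hk, if_pos ⟨h0, hin⟩]

theorem items_dstep (d : PySem.Dict String (List String)) (K : List String)
    (p : List (List (String × String))) (e : List (String × String))
    (hk : d.keys = K) (hnd : K.Nodup) (hne : ∀ t ∈ K, t ≠ "")
    (hcov : ∀ e' ∈ p, gT e' ≠ "" → gT e' ∈ K)
    (ih : d.items = K.map (fun t => (t, valsOf p t))) :
    (dstep d e).items = (kstep K e).map (fun t => (t, valsOf (p ++ [e]) t)) := by
  unfold dstep kstep
  by_cases h0 : gT e = ""
  · rw [if_neg (by simp [h0]), if_neg (by simp [h0]), ih]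
    apply List.map_congr_left
    intro t ht
    rw [vals_snoc, if_neg (fun h => hne t ht (h.symm.trans h0))]
    simp
  · rw [if_pos h0, modify_eq_insert, PySem.Dict.items_insert]
    by_cases hin : gT e ∈ K
    · have hcont : d.contains (gT e) = true := by
        rw [PySem.Dict.contains_iff_mem_keys, hk]; exact hin
      have hgetD : d.getD (gT e) [] = valsOf p (gT e) := by
        apply PySem.Dict.getD_of_mem_items
        · rw [ih]; exact List.mem_map.mpr ⟨gT e, hin, rfl⟩
        · rw [hk]; exact hnd
        
      rw [if_pos hcont, hgetD, if_neg (by simp [hin]), ih, List.map_map]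
      apply List.map_congr_left
      intro t ht
      simp only [Function.comp_apply]
      rw [vals_snoc]
      by_cases hte : t = gT e
      · subst hte; simp
      · have hb : (t == gT e) = false := by simp [hte]
        have hne2 : gT e ≠ t := fun h => hte h.symm
        simp [hb, hne2]
    · have hcont : d.contains (gT e) = false := by
        rw [Bool.eq_false_iff]
        intro hc
        exact hin (hk ▸ (PySem.Dict.contains_iff_mem_keys _ _).mp hc)
      have hvals : valsOf p (gT e) = [] := by
        unfold valsOf
        rw [List.filter_eq_nil_iff.mpr, List.map_nil]
        intro e' he' hc
        rw [decide_eq_true_iff] at hc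
        have hmemK : gT e' ∈ K := hcov e' he' (fun hh => h0 (hc.symm.trans hh))
        exact hin (hc ▸ hmemK)
      rw [if_neg (by simp [hcont]), PySem.Dict.getD_of_not_contains _ _ hcont, if_pos ⟨h0, hin⟩,
        ih, List.map_append]
      congr 1
      · apply List.map_congr_left
        intro t ht
        rw [vals_snoc, if_neg (fun (h : gT e = t) => hin (h.symm ▸ ht))]
        simp
      · simp [vals_snoc, hvals]

theorem keys_foldl_dstep (p : List (List (String × String))) :
    (p.foldl dstep PySem.Dict.empty).keys = p.foldl kstep [] := by
  induction p using List.reverseRecOn with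
  | nil => rfl
  | append_singleton p e ih =>
    rw [List.foldl_append, List.foldl_append]
    simp only [List.foldl_cons, List.foldl_nil]
    exact keys_dstep _ _ e ih

theorem items_foldl_dstep (p : List (List (String × String))) :
    (p.foldl dstep PySem.Dict.empty).items
      = (p.foldl kstep []).map (fun t => (t, valsOf p t)) := by
  induction p using List.reverseRecOn with
  | nil => rfl
  | append_singleton p e ih =>
    rw [List.foldl_append, List.foldl_append]
    simp only [List.foldl_cons, List.foldl_nil]
    refine items_dstep _ _ p e (keys_foldl_dstep p) (nodup_foldl_kstep p [] List.nodup_nil)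
      (fun t ht => ?_) (fun e' he' hne => mem_foldl_kstep p [] he' hne) ih
    rcases ne_empty_of_mem_foldl_kstep p [] ht with h | h
    · cases h
    · exact h

-- ===== VERDICT (by name: the statement is the Claim_ definition above) =====
theorem format_item_enchants_py_spec : Claim_equal_format_item_enchants_py := by
  intro enchants _
  unfold Spec_format_item_enchants_py format_item_enchants_py format_item_enchants_py_alt
  by_cases h : enchants = []
  · subst h; rfl
  · rw [if_neg h]
    exact items_foldl_dstep enchants
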